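-- pv_equiv track=rewrite | github.com/hyunjun/practice | python/problem-O-of-n/distribute_candies_to_people.py | distributeCandies
-- ===== SOURCE A (Python) =====
-- from typing import List
--
-- def distributeCandies(candies: int, num_people: int) -> List[int]:
--     i, n, ret = 0, 1, [0] * num_people
--     while 0 < candies:
--         if n <= candies:
--             ret[i] += n
--             candies -= n
--         else:
--             ret[i] += candies
--             candies -= candies
--         n += 1
--         i += 1
--         if i == num_people:
--             i = 0
--     return ret
-- ===== SOURCE B (Python) =====
-- from typing import List
--
-- def distributeCandies(candies: int, num_people: int) -> List[int]:
--     if candies <= 0: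
--         return [0] * num_people
--     # number of complete gifts k: largest k with k*(k+1)//2 <= candies, by binary search
--     hi = 1
--     while hi * (hi + 1) // 2 <= candies:
--         hi *= 2
--     lo = 0
--     while lo + 1 < hi:
--         mid = (lo + hi) // 2
--         if mid * (mid + 1) // 2 <= candies:
--             lo = mid
--         else:
--             hi = mid
--     k = lo
--     rem = candies - k * (k + 1) // 2   # leftover, goes to person k % num_people
--     res = []
--     for j in range(num_people):
--         m = (k - j - 1) // num_people + 1 if j < k else 0   # complete gifts person j got
--         v = m * (j + 1) + num_people * (m * (m - 1) // 2)
--         if k % num_people == j: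
--             v += rem
--         res.append(v)
--     return res
-- ===== Notes on version B (the rewrite author's own statement) =====
-- stated objective: alternative
-- what changed: Replaces A's one-candy-gift-at-a-time simulation loop (one loop iteration per gift handed out, updating ret in place) by a closed form: the number k of complete gifts is found by binary search on the triangular numbers, and each person's total is computed directly as an arithmetic-series sum, with the leftover added to person k % num_people.
import Mathlib
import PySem

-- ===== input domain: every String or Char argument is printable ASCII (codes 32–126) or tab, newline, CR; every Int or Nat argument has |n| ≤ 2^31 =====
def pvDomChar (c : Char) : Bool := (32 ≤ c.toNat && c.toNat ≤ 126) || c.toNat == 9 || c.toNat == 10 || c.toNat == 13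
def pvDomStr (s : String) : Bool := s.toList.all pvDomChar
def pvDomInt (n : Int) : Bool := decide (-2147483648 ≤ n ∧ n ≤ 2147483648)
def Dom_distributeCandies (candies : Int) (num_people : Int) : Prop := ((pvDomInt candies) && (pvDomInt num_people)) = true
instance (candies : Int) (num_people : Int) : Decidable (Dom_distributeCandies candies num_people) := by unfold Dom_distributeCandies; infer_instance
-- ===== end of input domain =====

-- B replaces A's gift-by-gift simulation with a binary search for the number of
-- complete gifts plus a per-person arithmetic-series closed form (objective: alternative).

-- ===== PORT A =====
-- while loop of A; fuel = candies.toNat is exact, since every executed iteration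
-- decreases candies by at least 1 (n ≥ 1 throughout) and once candies ≤ 0 the
-- result no longer changes.
def distributeCandiesLoop (num_people : Int) (fuel : Nat) (candies i n : Int)
    (ret : List Int) : List Int :=
  match fuel with
  | 0 => ret
  | fuel + 1 =>
    if 0 < candies then
      if n ≤ candies then
        distributeCandiesLoop num_people fuel (candies - n)
          (if i + 1 == num_people then 0 else i + 1) (n + 1)
          (PySem.List.pySetD ret i (PySem.List.pyGetD ret i 0 + n))
      else
        distributeCandiesLoop num_people fuel (candies - candies)
          (if i + 1 == num_people then 0 else i + 1) (n + 1)
          (PySem.List.pySetD ret i (PySem.List.pyGetD ret i 0 + candies))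
    else ret

def distributeCandies (candies : Int) (num_people : Int) : List Int :=
  distributeCandiesLoop num_people candies.toNat candies 0 1
    (PySem.List.pyRepeat [(0 : Int)] num_people)

-- ===== PORT B =====
-- first while loop of B: double hi until hi*(hi+1)//2 > candies.
-- fuel = candies.toNat is exact: hi at least doubles from 1 each iteration.
def distributeCandiesGrow (candies : Int) (fuel : Nat) (hi : Int) : Int :=
  match fuel with
  | 0 => hi
  | fuel + 1 =>
    if PySem.Int.floordiv (hi * (hi + 1)) 2 ≤ candies then
      distributeCandiesGrow candies fuel (hi * 2)
    else hi

-- second while loop of B: binary search; fuel = hi.toNat is exact ((hi-lo) shrinks).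
def distributeCandiesBS (candies : Int) (fuel : Nat) (lo hi : Int) : Int :=
  match fuel with
  | 0 => lo
  | fuel + 1 =>
    if lo + 1 < hi then
      let mid := PySem.Int.floordiv (lo + hi) 2
      if PySem.Int.floordiv (mid * (mid + 1)) 2 ≤ candies then
        distributeCandiesBS candies fuel mid hi
      else
        distributeCandiesBS candies fuel lo mid
    else lo

def distributeCandies_alt (candies : Int) (num_people : Int) : List Int :=
  if candies ≤ 0 then PySem.List.pyRepeat [(0 : Int)] num_people
  else
    let hi := distributeCandiesGrow candies candies.toNat 1
    let k := distributeCandiesBS candies hi.toNat 0 hi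
    let rem := candies - PySem.Int.floordiv (k * (k + 1)) 2
    (PySem.List.pyRange 0 num_people 1).foldl (fun res j =>
      let m : Int := if j < k then PySem.Int.floordiv (k - j - 1) num_people + 1 else 0
      let v := m * (j + 1) + num_people * (PySem.Int.floordiv (m * (m - 1)) 2)
      res ++ [if PySem.Int.mod k num_people == j then v + rem else v]) []

-- ===== PRECONDITION & SPEC =====
-- Pre_ excludes exactly the inputs where A raises IndexError: candies > 0 with
-- num_people ≤ 0 (A then indexes into the empty ret list).
def Pre_distributeCandies (candies : Int) (num_people : Int) : Prop :=
  0 < num_people ∨ candies ≤ 0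
instance (candies : Int) (num_people : Int) : Decidable (Pre_distributeCandies candies num_people) := by
  unfold Pre_distributeCandies; infer_instance

def pvWitness_distributeCandies : Int × Int := (10, 3)

def Spec_distributeCandies (candies : Int) (num_people : Int) (out : List Int) : Prop :=
  out = distributeCandies_alt candies num_people
instance (candies : Int) (num_people : Int) (out : List Int) : Decidable (Spec_distributeCandies candies num_people out) := by
  unfold Spec_distributeCandies; infer_instance

-- ===== CLAIM (what is proved, stated in full; the proofs are below) =====
def Claim_equal_distributeCandies : Prop := ∀ (candies : Int) (num_people : Int), Dom_distributeCandies candies num_people → Pre_distributeCandies candies num_people → Spec_distributeCandies candies num_people (distributeCandies candies num_people)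
-- ===== LEMMAS AND PROOFS =====

-- T m = 1 + 2 + … + m
def pvT : Nat → Nat
  | 0 => 0
  | m + 1 => pvT m + (m + 1)

-- sum of the gifts among 1..m that go to person j (gift s+1 goes to person s % P)
def pvSum (P j m : Nat) : Nat := ∑ s ∈ Finset.range m, if s % P = j then s + 1 else 0

-- number of gifts among 1..m that go to person j
def pvCnt (P j m : Nat) : Nat := ∑ s ∈ Finset.range m, if s % P = j then 1 else 0

-- state of A's ret after the first m gifts have been fully handed out
def pvRet (P m : Nat) : List Int := (List.range P).map (fun j => (pvSum P j m : Int))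

theorem pvT_two_mul (m : Nat) : 2 * pvT m = m * (m + 1) := by
  induction m with
  | zero => rfl
  | succ m ih => simp [pvT]; ring_nf; ring_nf at ih; omega

theorem pvT_mono : Monotone pvT := by
  apply monotone_nat_of_le_succ
  intro n; simp [pvT]

theorem pvT_unique {C : Int} {a b : Nat} (ha1 : (pvT a : Int) ≤ C) (ha2 : C < pvT (a + 1))
    (hb1 : (pvT b : Int) ≤ C) (hb2 : C < pvT (b + 1)) : a = b := by
  rcases lt_trichotomy a b with h | h | h
  · exfalso
    have : pvT (a + 1) ≤ pvT b := pvT_mono h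
    have : (pvT (a+1) : Int) ≤ (pvT b : Int) := by exact_mod_cast this
    omega
  · exact h
  · exfalso
    have : pvT (b + 1) ≤ pvT a := pvT_mono h
    have : (pvT (b+1) : Int) ≤ (pvT a : Int) := by exact_mod_cast this
    omega

theorem pvCnt_eq (P j : Nat) (hj : j < P) (k : Nat) :
    pvCnt P j k = if j < k then (k - j - 1) / P + 1 else 0 := by
  induction k with
  | zero => simp [pvCnt]
  | succ k ih =>
    unfold pvCnt at *
    rw [Finset.sum_range_succ, ih]
    by_cases hjk : j < k
    · have hjk1 : j < k + 1 := by omega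
      have hmod : (k % P = j) ↔ P ∣ (k - j) := by
        constructor
        · intro h
          have h2 : j % P = k % P := by rw [h, Nat.mod_eq_of_lt hj]
          exact (Nat.modEq_iff_dvd' (by omega)).mp h2
        · intro h
          have h2 : j % P = k % P := (Nat.modEq_iff_dvd' (by omega)).mpr h
          rw [← h2, Nat.mod_eq_of_lt hj]
      have hd : k - j - 1 + 1 = k - j := by omega
      have hsd : (k - j) / P = (k - j - 1) / P + if P ∣ (k - j) then 1 else 0 := by
        rw [← hd, Nat.succ_div, hd]
      have hg : k + 1 - j - 1 = k - j := by omega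
      rw [if_pos hjk, if_pos hjk1, hg]
      by_cases hm : k % P = j
      · rw [if_pos hm, if_pos (hmod.mp hm)] at *
        omega
      · rw [if_neg hm] at *
        rw [if_neg (fun h => hm (hmod.mpr h))] at hsd
        omega
    · by_cases hjk1 : j < k + 1
      · have hjek : j = k := by omega
        have hkm : k % P = j := by rw [hjek, Nat.mod_eq_of_lt (hjek ▸ hj)]
        rw [if_neg hjk, if_pos hjk1, if_pos hkm]
        have hz : k + 1 - j - 1 = 0 := by omega
        rw [hz, Nat.zero_div]
      · have h1 : k % P ≤ k := Nat.mod_le k P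
        have h2 : ¬ (k % P = j) := by omega
        rw [if_neg hjk, if_neg hjk1, if_neg h2]

theorem pvCnt_mod (P k : Nat) (hP : 0 < P) : pvCnt P (k % P) k = k / P := by
  rw [pvCnt_eq P (k % P) (Nat.mod_lt k hP) k]
  by_cases h : k % P < k
  · rw [if_pos h]
    have hq : 1 ≤ k / P := by
      rcases Nat.lt_or_ge k P with hlt | hge
      · rw [Nat.mod_eq_of_lt hlt] at h; omega
      · exact Nat.one_le_div_iff hP |>.mpr hge
    obtain ⟨q', hq'⟩ : ∃ q', k / P = q' + 1 := ⟨k / P - 1, by omega⟩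
    have hdm := Nat.div_add_mod k P
    rw [hq', Nat.mul_add] at hdm
    have he : k - k % P - 1 = (P - 1) + P * q' := by omega
    rw [he, Nat.add_mul_div_left _ _ hP, Nat.div_eq_of_lt (by omega)]
    omega
  · rw [if_neg h]
    have h1 := Nat.mod_le k P
    have h3 : k < P := by
      by_contra hge
      have := Nat.mod_lt k hP
      omega
    rw [Nat.div_eq_of_lt h3]

theorem pvSum_succ (P j k : Nat) :
    pvSum P j (k + 1) = pvSum P j k + if k % P = j then k + 1 else 0 := by
  unfold pvSum; rw [Finset.sum_range_succ]

theorem pvCnt_succ (P j k : Nat) :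
    pvCnt P j (k + 1) = pvCnt P j k + if k % P = j then 1 else 0 := by
  unfold pvCnt; rw [Finset.sum_range_succ]

theorem pvSum_eq (P j : Nat) (hP : 0 < P) (k : Nat) :
    pvSum P j k = pvCnt P j k * (j + 1) + P * pvT (pvCnt P j k - 1) := by
  induction k with
  | zero => simp [pvSum, pvCnt, pvT]
  | succ k ih =>
    rw [pvSum_succ, pvCnt_succ, ih]
    by_cases hm : k % P = j
    · rw [if_pos hm, if_pos hm]
      have hc2 : pvCnt P j k = k / P := by rw [← hm]; exact pvCnt_mod P k hP
      rw [hc2]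
      have hdm := Nat.div_add_mod k P
      rw [hm] at hdm
      rcases hq : k / P with _ | q' <;> rw [hq] at hdm
      · simp [pvT]; omega
      · have h1 : q' + 1 - 1 = q' := by omega
        have h2 : q' + 1 + 1 - 1 = q' + 1 := by omega
        rw [h1, h2]
        have e1 : (q' + 1 + 1) * (j + 1) = (q' + 1) * (j + 1) + (j + 1) := by ring
        have e2 : P * pvT (q' + 1) = P * pvT q' + P * (q' + 1) := by rw [pvT]; ring
        omega
    · simp [hm]

theorem pvTi_natCast (m : Nat) :
    PySem.Int.floordiv ((m : Int) * ((m : Int) + 1)) 2 = (pvT m : Int) := by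
  rw [PySem.Int.floordiv_eq_ediv_of_pos (by omega)]
  have h := pvT_two_mul m
  have h2 : ((m : Int) * ((m : Int) + 1)) = 2 * (pvT m : Int) := by exact_mod_cast h.symm
  rw [h2]
  omega

theorem pvTi_ge_self (hi : Int) (h : 1 ≤ hi) :
    hi ≤ PySem.Int.floordiv (hi * (hi + 1)) 2 := by
  rw [PySem.Int.le_floordiv_iff_mul_le (by omega)]
  nlinarith

theorem grow_spec (C : Int) : ∀ (fuel : Nat) (hi : Int), 1 ≤ hi →
    (C + 1 - hi).toNat ≤ fuel →
    1 ≤ distributeCandiesGrow C fuel hi ∧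
      C < PySem.Int.floordiv (distributeCandiesGrow C fuel hi * (distributeCandiesGrow C fuel hi + 1)) 2 := by
  intro fuel
  induction fuel with
  | zero =>
    intro hi h1 h2
    have h3 : C + 1 ≤ hi := by omega
    have h4 := pvTi_ge_self hi h1
    simp only [distributeCandiesGrow]
    omega
  | succ fuel ih =>
    intro hi h1 h2
    simp only [distributeCandiesGrow]
    split
    · rename_i hle
      have hself := pvTi_ge_self hi h1
      exact ih (hi * 2) (by omega) (by omega)
    · rename_i hgt
      exact ⟨h1, by omega⟩

theorem bs_spec (C : Int) : ∀ (fuel : Nat) (lo hi : Int), 0 ≤ lo → lo < hi →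
    PySem.Int.floordiv (lo * (lo + 1)) 2 ≤ C →
    C < PySem.Int.floordiv (hi * (hi + 1)) 2 →
    (hi - lo).toNat ≤ fuel →
    0 ≤ distributeCandiesBS C fuel lo hi ∧
      PySem.Int.floordiv (distributeCandiesBS C fuel lo hi * (distributeCandiesBS C fuel lo hi + 1)) 2 ≤ C ∧
      C < PySem.Int.floordiv ((distributeCandiesBS C fuel lo hi + 1) * (distributeCandiesBS C fuel lo hi + 2)) 2 := by
  intro fuel
  induction fuel with
  | zero =>
    intro lo hi h0 hlt _ _ hf
    omega
  | succ fuel ih =>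
    intro lo hi h0 hlt hlo hhi hf
    simp only [distributeCandiesBS]
    split
    · rename_i hcond
      have hmid : lo + 1 ≤ PySem.Int.floordiv (lo + hi) 2 ∧ PySem.Int.floordiv (lo + hi) 2 ≤ hi - 1 := by
        rw [PySem.Int.floordiv_eq_ediv_of_pos (by omega)]
        omega
      split
      · rename_i hle
        exact ih _ hi (by omega) (by omega) hle hhi (by omega)
      · rename_i hgt
        exact ih lo _ h0 (by omega) hlo (by omega) (by omega)
    · rename_i hstop
      have hhi1 : hi = lo + 1 := by omega
      refine ⟨h0, hlo, ?_⟩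
      rw [hhi1] at hhi
      convert hhi using 3
      ring

theorem foldl_append_map (g : Int → Int) : ∀ (l : List Int) (init : List Int),
    l.foldl (fun acc j => acc ++ [g j]) init = init ++ l.map g := by
  intro l
  induction l with
  | nil => simp
  | cons x xs ih => intro init; simp [List.foldl_cons, ih]

-- B evaluated: alt C P is A's ret after k complete gifts, with the remainder added
-- to person k % P
theorem floordiv_pred (c : Nat) :
    PySem.Int.floordiv ((c : Int) * ((c : Int) - 1)) 2 = (pvT (c - 1) : Int) := by
  cases c with
  | zero => decide
  | succ c =>
    have h : ((c + 1 : Nat) : Int) * (((c + 1 : Nat) : Int) - 1) = (c : Int) * ((c : Int) + 1) := by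
      push_cast; ring
    rw [h, pvTi_natCast]
    simp

theorem alt_eval (C P : Int) (hC : 1 ≤ C) (hP : 1 ≤ P) (k : Nat)
    (h1 : (pvT k : Int) ≤ C) (h2 : C < pvT (k + 1)) :
    distributeCandies_alt C P =
      (pvRet P.toNat k).set (k % P.toNat)
        ((pvSum P.toNat (k % P.toNat) k : Int) + (C - pvT k)) := by
  obtain ⟨P', rfl⟩ := Int.eq_ofNat_of_zero_le (by omega : (0:Int) ≤ P)
  have hP' : 0 < P' := by exact_mod_cast hP
  simp only [Int.toNat_natCast]
  unfold distributeCandies_alt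
  rw [if_neg (by omega)]
  obtain ⟨hg1, hg2⟩ := grow_spec C C.toNat 1 (by omega) (by omega)
  set hi := distributeCandiesGrow C C.toNat 1 with hhi
  obtain ⟨hkb0, hkbl, hkbu⟩ := bs_spec C hi.toNat 0 hi (by omega) (by omega)
    (by
      rw [show ((0:Int) * (0 + 1)) = (((0:Nat) : Int) * (((0:Nat) : Int) + 1)) by norm_num,
        pvTi_natCast]
      simp [pvT]; omega)
    hg2 (by omega)
  simp only []
  generalize hk2 : distributeCandiesBS C hi.toNat 0 hi = kb
  rw [hk2] at hkb0 hkbl hkbu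
  have hcast : kb = ((kb.toNat : Nat) : Int) := by omega
  rw [hcast, pvTi_natCast] at hkbl
  rw [hcast] at hkbu
  rw [show (((kb.toNat : Nat) : Int) + 1) * (((kb.toNat : Nat) : Int) + 2)
      = ((kb.toNat + 1 : Nat) : Int) * (((kb.toNat + 1 : Nat) : Int) + 1) by push_cast; ring,
    pvTi_natCast] at hkbu
  have hkk : kb.toNat = k := pvT_unique hkbl hkbu h1 h2
  have hcast2 : kb = ((k : Nat) : Int) := by rw [hcast, hkk]
  rw [hcast2]
  rw [show (((k:Nat) : Int) * (((k:Nat) : Int) + 1)) = ((k : Int) * ((k : Int) + 1)) by norm_num] at *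
  rw [pvTi_natCast]
  show (PySem.List.pyRange 0 P' 1).foldl
      (fun res j => res ++ [(fun j : Int =>
        if PySem.Int.mod (k : Int) (P' : Int) == j then
          (if j < (k : Int) then PySem.Int.floordiv ((k : Int) - j - 1) (P' : Int) + 1 else 0) * (j + 1)
            + (P' : Int) * (PySem.Int.floordiv ((if j < (k : Int) then PySem.Int.floordiv ((k : Int) - j - 1) (P' : Int) + 1 else 0) * ((if j < (k : Int) then PySem.Int.floordiv ((k : Int) - j - 1) (P' : Int) + 1 else 0) - 1)) 2)
            + (C - (pvT k : Int))
        else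
          (if j < (k : Int) then PySem.Int.floordiv ((k : Int) - j - 1) (P' : Int) + 1 else 0) * (j + 1)
            + (P' : Int) * (PySem.Int.floordiv ((if j < (k : Int) then PySem.Int.floordiv ((k : Int) - j - 1) (P' : Int) + 1 else 0) * ((if j < (k : Int) then PySem.Int.floordiv ((k : Int) - j - 1) (P' : Int) + 1 else 0) - 1)) 2)) j]) []
      = _
  rw [foldl_append_map]
  rw [PySem.List.pyRange_one]
  rw [List.map_map, List.nil_append]
  have hlen : P' = ((P' : Int) - 0).toNat := by omega
  apply List.ext_getElem
  · simp [pvRet]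
  · intro j hjl hjr
    have hj : j < P' := by simpa using hjl
    simp only [List.getElem_map, List.getElem_range, Function.comp_apply]
    rw [List.getElem_set]
    -- evaluate m
    have hm_eq : (if ((j : Int)) < (k : Int) then PySem.Int.floordiv ((k : Int) - (j : Int) - 1) (P' : Int) + 1 else 0)
        = ((pvCnt P' j k : Nat) : Int) := by
      rw [pvCnt_eq P' j hj k]
      by_cases hjk : j < k
      · rw [if_pos (by exact_mod_cast hjk), if_pos hjk]
        rw [show ((k : Int) - (j : Int) - 1) = ((k - j - 1 : Nat) : Int) by omega,
          PySem.Int.floordiv_natCast]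
        push_cast; ring
      · rw [if_neg (by exact_mod_cast hjk), if_neg hjk]
        norm_num
    have hv_eq : ((pvCnt P' j k : Nat) : Int) * ((j : Int) + 1)
          + (P' : Int) * PySem.Int.floordiv (((pvCnt P' j k : Nat) : Int) * (((pvCnt P' j k : Nat) : Int) - 1)) 2
        = ((pvSum P' j k : Nat) : Int) := by
      rw [floordiv_pred, pvSum_eq P' j hP' k]
      push_cast; ring
    have hmod : PySem.Int.mod (k : Int) (P' : Int) = ((k % P' : Nat) : Int) :=
      PySem.Int.mod_natCast k P'
    simp only [zero_add, hm_eq, hv_eq, hmod, beq_iff_eq, Int.natCast_inj]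
    by_cases hc : k % P' = j
    · rw [if_pos hc, if_pos hc, hc]
    · rw [if_neg hc, if_neg hc]
      simp [pvRet, pvSum]


theorem loop_zero (P : Int) : ∀ (fuel : Nat) (i n : Int) (ret : List Int),
    distributeCandiesLoop P fuel 0 i n ret = ret := by
  intro fuel i n ret
  cases fuel <;> simp [distributeCandiesLoop]

theorem pvRet_getD (P m j : Nat) (hj : j < P) :
    (pvRet P m).getD j 0 = (pvSum P j m : Int) := by
  simp [pvRet, List.getD, hj]

theorem pvRet_set_succ (P m : Nat) :
    (pvRet P m).set (m % P) ((pvSum P (m % P) m : Int) + ((m : Int) + 1)) = pvRet P (m + 1) := by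
  apply List.ext_getElem
  · simp [pvRet]
  · intro j h1 h2
    have hj : j < P := by simpa [pvRet] using h2
    rw [List.getElem_set]
    simp only [pvRet, List.getElem_map, List.getElem_range]
    by_cases hc : m % P = j
    · rw [if_pos hc]
      subst hc
      rw [pvSum_succ]
      simp
    · rw [if_neg hc, pvSum_succ]
      simp [hc]

theorem wrap_eq (P m : Nat) (hP : 0 < P) :
    (if (((m % P : Nat) : Int) + 1 == (P : Int)) then (0 : Int) else ((m % P : Nat) : Int) + 1)
      = (((m + 1) % P : Nat) : Int) := by
  have hlt := Nat.mod_lt m hP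
  have hmod : (m + 1) % P = if m % P + 1 = P then 0 else m % P + 1 := by
    rw [Nat.add_mod]
    by_cases h1 : P = 1
    · subst h1
      simp [Nat.mod_one]
    · rw [Nat.mod_eq_of_lt (show 1 < P by omega)]
      by_cases h : m % P + 1 = P
      · rw [if_pos h, h, Nat.mod_self]
      · rw [if_neg h, Nat.mod_eq_of_lt (by omega)]
  rw [hmod]
  simp only [beq_iff_eq]
  by_cases h : m % P + 1 = P
  · have h2 : ((m % P : Nat) : Int) + 1 = (P : Int) := by exact_mod_cast h
    rw [if_pos h, if_pos h2]
    simp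
  · have h2 : ¬(((m % P : Nat) : Int) + 1 = (P : Int)) := fun hx => h (by exact_mod_cast hx)
    rw [if_neg h, if_neg h2]
    push_cast
    ring

theorem pvT_succ_cast (m : Nat) : (pvT (m + 1) : Int) = (pvT m : Int) + ((m : Int) + 1) := by
  simp [pvT]

theorem loop_exit (C P : Int) (hC : 1 ≤ C) (hP : 1 ≤ P) (m : Nat) (hCm : C = (pvT m : Int)) :
    pvRet P.toNat m = distributeCandies_alt C P := by
  have hub : C < (pvT (m + 1) : Int) := by
    rw [pvT_succ_cast]; omega
  rw [alt_eval C P hC hP m (by omega) hub]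
  apply List.ext_getElem
  · simp [pvRet]
  · intro j h1 h2
    rw [List.getElem_set]
    by_cases hc : m % P.toNat = j
    · rw [if_pos hc]
      subst hc
      have hz : C - (pvT m : Int) = 0 := by omega
      rw [hz, add_zero]
      simp [pvRet]
    · rw [if_neg hc]

theorem loop_main (C P : Int) (hC : 1 ≤ C) (hP : 1 ≤ P) :
    ∀ (fuel : Nat) (m : Nat), (pvT m : Int) ≤ C → (C - pvT m).toNat ≤ fuel →
    distributeCandiesLoop P fuel (C - (pvT m : Int)) ((m % P.toNat : Nat) : Int)
      (((m : Nat) : Int) + 1) (pvRet P.toNat m) = distributeCandies_alt C P := by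
  intro fuel
  induction fuel with
  | zero =>
    intro m h1 h2
    have hCm : C = (pvT m : Int) := by omega
    simp only [distributeCandiesLoop]
    exact loop_exit C P hC hP m hCm
  | succ fuel ih =>
    intro m h1 h2
    have hP' : 0 < P.toNat := by omega
    have hPP : ((P.toNat : Nat) : Int) = P := by omega
    simp only [distributeCandiesLoop]
    by_cases hpos : 0 < C - (pvT m : Int)
    · rw [if_pos hpos]
      by_cases hfull : ((m : Nat) : Int) + 1 ≤ C - (pvT m : Int)
      · rw [if_pos hfull]
        have e1 : C - (pvT m : Int) - (((m : Nat) : Int) + 1) = C - (pvT (m + 1) : Int) := by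
          rw [pvT_succ_cast]; ring
        have e2 : (if ((m % P.toNat : Nat) : Int) + 1 == P then (0 : Int)
              else ((m % P.toNat : Nat) : Int) + 1) = (((m + 1) % P.toNat : Nat) : Int) := by
          rw [← hPP]
          exact wrap_eq P.toNat m hP'
        have e3 : PySem.List.pySetD (pvRet P.toNat m) ((m % P.toNat : Nat) : Int)
              (PySem.List.pyGetD (pvRet P.toNat m) ((m % P.toNat : Nat) : Int) 0 + (((m : Nat) : Int) + 1))
            = pvRet P.toNat (m + 1) := by
          simp only [PySem.List.pySetD_natCast, PySem.List.pyGetD_natCast]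
          rw [pvRet_getD P.toNat m (m % P.toNat) (Nat.mod_lt m hP')]
          exact pvRet_set_succ P.toNat m
        rw [e1, e2, e3]
        have := ih (m + 1) (by rw [pvT_succ_cast] at e1 ⊢; omega)
          (by rw [pvT_succ_cast]; rw [pvT_succ_cast] at e1; omega)
        convert this using 3
      · rw [if_neg hfull, sub_self, loop_zero]
        have hub : C < (pvT (m + 1) : Int) := by
          rw [pvT_succ_cast]; omega
        rw [alt_eval C P hC hP m h1 hub]
        simp only [PySem.List.pySetD_natCast, PySem.List.pyGetD_natCast]
        rw [pvRet_getD P.toNat m (m % P.toNat) (Nat.mod_lt m hP')]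
    · rw [if_neg hpos]
      have hCm : C = (pvT m : Int) := by omega
      exact loop_exit C P hC hP m hCm

-- ===== VERDICT (by name: the statement is the Claim_ definition above) =====
theorem distributeCandies_spec : Claim_equal_distributeCandies := by
  intro C P _ hpre
  unfold Spec_distributeCandies distributeCandies
  by_cases hC : C ≤ 0
  · have hz : C.toNat = 0 := by omega
    rw [hz]
    simp only [distributeCandiesLoop]
    unfold distributeCandies_alt
    rw [if_pos hC]
  · have hC1 : 1 ≤ C := by omega
    have hP : 1 ≤ P := by
      rcases hpre with h | h
      · exact h
      · omega
    have h0 : PySem.List.pyRepeat [(0 : Int)] P = pvRet P.toNat 0 := by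
      rw [PySem.List.pyRepeat_singleton]
      apply List.ext_getElem
      · simp [pvRet]
      · intro j h1 h2
        simp [pvRet, pvSum]
    rw [h0]
    have := loop_main C P hC1 hP C.toNat 0 (by simp [pvT]; omega) (by simp [pvT])
    simpa [pvT] using this
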